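-- pv_equiv track=rewrite | github.com/pypi-data/pypi-mirror-374 | packages/circremote/circremote-0.12.0.tar.gz/circremote-0.12.0/circremote/commands/enable-webworkflow/code.py | check_webworkflow_config
-- ===== SOURCE A (Python) =====
-- def check_webworkflow_config(settings_content):
--     """Check if Web Workflow is already configured."""
--     if not settings_content:
--         return False
--
--     # Check for existing Web Workflow configuration
--     webworkflow_vars = [
--         'CIRCUITPY_WEB_API_PASSWORD',
--         'CIRCUITPY_WEB_API_PORT',
--         'CIRCUITPY_WEB_API_HOST'
--     ]
--
--     # Check for existing WiFi configuration
--     wifi_vars = [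
--         'CIRCUITPY_WIFI_SSID',
--         'CIRCUITPY_WIFI_PASSWORD'
--     ]
--
--     # Check if any Web Workflow or WiFi variables are already configured
--     for var in webworkflow_vars + wifi_vars:
--         if var in settings_content:
--             return True
--
--     return False
-- ===== SOURCE B (Python) =====
-- # All five configuration variables share the prefix 'CIRCUITPY_W', so scan the
-- # text once for that anchor and test the possible tails at each hit.
-- _SUFFIXES = ('EB_API_PASSWORD', 'EB_API_PORT', 'EB_API_HOST',
--              'IFI_SSID', 'IFI_PASSWORD')
--
--
-- def check_webworkflow_config(settings_content):
--     """Check if Web Workflow is already configured."""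
--     i = settings_content.find('CIRCUITPY_W')
--     while i != -1:
--         if settings_content.startswith(_SUFFIXES, i + 11):
--             return True
--         i = settings_content.find('CIRCUITPY_W', i + 1)
--     return False
-- ===== Notes on version B (the rewrite author's own statement) =====
-- stated objective: alternative
-- what changed: Instead of five independent substring scans, B exploits that all five variable names share the same 11-character prefix: it scans the text once with find for that anchor and tests the five possible tails with tuple-startswith at each hit (the empty guard disappears: find on empty text returns -1 immediately).
import Mathlib
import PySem

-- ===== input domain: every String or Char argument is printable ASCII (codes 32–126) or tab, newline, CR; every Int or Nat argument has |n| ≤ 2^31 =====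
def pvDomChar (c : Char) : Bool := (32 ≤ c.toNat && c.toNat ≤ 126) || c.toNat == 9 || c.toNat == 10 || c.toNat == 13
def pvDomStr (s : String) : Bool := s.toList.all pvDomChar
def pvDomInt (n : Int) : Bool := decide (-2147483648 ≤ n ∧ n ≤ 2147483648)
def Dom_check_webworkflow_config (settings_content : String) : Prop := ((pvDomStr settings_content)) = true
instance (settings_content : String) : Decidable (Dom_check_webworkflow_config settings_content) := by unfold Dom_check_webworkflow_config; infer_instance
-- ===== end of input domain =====

-- B replaces A's five independent substring scans by one find-scan for the shared
-- 11-char prefix 'CIRCUITPY_W', testing the five possible tails at each hit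
-- (objective: alternative single-scan algorithm).

-- ===== PORT A =====
-- A: empty guard, then 'for var in webworkflow_vars + wifi_vars: if var in settings_content: return True'
-- (the early-return loop is folded left with || over the same list, in the same order).
def check_webworkflow_config (settings_content : String) : Bool :=
  if settings_content == "" then false
  else
    let webworkflow_vars := ["CIRCUITPY_WEB_API_PASSWORD", "CIRCUITPY_WEB_API_PORT", "CIRCUITPY_WEB_API_HOST"]
    let wifi_vars := ["CIRCUITPY_WIFI_SSID", "CIRCUITPY_WIFI_PASSWORD"]
    (webworkflow_vars ++ wifi_vars).foldl
      (fun acc var => acc || PySem.Str.isIn var settings_content) false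

-- ===== PORT B =====
-- Source B's module constant _SUFFIXES
def pvSuffixes : List String :=
  ["EB_API_PASSWORD", "EB_API_PORT", "EB_API_HOST", "IFI_SSID", "IFI_PASSWORD"]

-- the anchor literal 'CIRCUITPY_W' of Source B
def pvAnchor : List Char := "CIRCUITPY_W".toList

-- Source B's while-loop over the current find result i; fuel (= len+1 at the call) is
-- only a termination device: each iteration restarts find past the previous hit.
-- s.startswith(p, i) is ported exactly as startswith on the slice s[i:] (slice-bound
-- rule); tuple-startswith = any of the tuple's members is a prefix.
def pvScanLoop (s : List Char) (fuel : Nat) (i : Int) : Bool :=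
  match fuel with
  | 0 => false
  | fuel + 1 =>
    if i == -1 then false
    else if pvSuffixes.any (fun v =>
        PySem.Chars.startswith (PySem.Chars.slice s (some (i + 11)) none) v.toList) then true
    else pvScanLoop s fuel (PySem.Chars.findFrom s pvAnchor (i + 1) none)

def check_webworkflow_config_alt (settings_content : String) : Bool :=
  pvScanLoop settings_content.toList (settings_content.toList.length + 1)
    (PySem.Chars.find settings_content.toList pvAnchor)

-- ===== PRECONDITION & SPEC =====
def Spec_check_webworkflow_config (settings_content : String) (out : Bool) : Prop := out = check_webworkflow_config_alt settings_content
instance (settings_content : String) (out : Bool) : Decidable (Spec_check_webworkflow_config settings_content out) := by unfold Spec_check_webworkflow_config; infer_instance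

-- ===== CLAIM (what is proved, stated in full; the proofs are below) =====
def Claim_equal_check_webworkflow_config : Prop := ∀ (settings_content : String), Dom_check_webworkflow_config settings_content → Spec_check_webworkflow_config settings_content (check_webworkflow_config settings_content)

-- ===== LEMMAS AND PROOFS =====

-- A's full variable names, and their factoring as anchor ++ suffix
def pvVars : List String :=
  ["CIRCUITPY_WEB_API_PASSWORD", "CIRCUITPY_WEB_API_PORT", "CIRCUITPY_WEB_API_HOST",
   "CIRCUITPY_WIFI_SSID", "CIRCUITPY_WIFI_PASSWORD"]

lemma pv_foldl_or {α : Type} (l : List α) (p : α → Bool) (b : Bool) :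
    l.foldl (fun acc a => acc || p a) b = (b || l.any p) := by
  induction l generalizing b with
  | nil => simp
  | cons a l ih => simp [ih, Bool.or_assoc]

lemma pv_append_prefix (a b l : List Char) :
    (a ++ b) <+: l ↔ a <+: l ∧ b <+: l.drop a.length := by
  constructor
  · rintro ⟨t, ht⟩
    rw [List.append_assoc] at ht
    subst ht
    exact ⟨⟨b ++ t, rfl⟩, by simpa [List.drop_left] using ⟨t, rfl⟩⟩
  · rintro ⟨⟨t1, h1⟩, ⟨t2, h2⟩⟩
    subst h1
    rw [List.drop_left] at h2
    exact ⟨t2, by rw [List.append_assoc, h2]⟩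

-- the suffix test Source B performs at a hit position j
def pvHit (s : List Char) (j : Nat) : Bool :=
  pvSuffixes.any (fun v => PySem.Chars.startswith (s.drop (j + 11)) v.toList)

-- loop invariant: starting the find-scan at position k finds a configured
-- variable iff one occurs at some position ≥ k
lemma pv_loop_iff (s : List Char) (fuel k : Nat) (hk : k ≤ s.length)
    (hf : s.length + 1 - k ≤ fuel) :
    pvScanLoop s fuel (PySem.Chars.findFrom s pvAnchor (k : Int) none) = true ↔
      ∃ j, k ≤ j ∧ pvAnchor <+: s.drop j ∧ pvHit s j = true := by
  induction fuel generalizing k with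
  | zero => omega
  | succ fuel ih =>
    by_cases hr : PySem.Chars.findFrom s pvAnchor (k : Int) none = -1
    · rw [hr]
      simp only [pvScanLoop, if_pos (by decide : ((-1 : Int) == -1) = true),
        Bool.false_eq_true, false_iff]
      rintro ⟨j, hj, hpre, -⟩
      have hinf : pvAnchor <:+: s.drop k := by
        have : s.drop j = (s.drop k).drop (j - k) := by
          rw [List.drop_drop]; congr 1; omega
        rw [this] at hpre
        exact hpre.isInfix.trans (List.drop_suffix _ _).isInfix
      exact (PySem.Chars.findFrom_natCast_eq_neg_one_iff s pvAnchor k hk).mp hr hinf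
    · obtain ⟨hge, hpre, hmin⟩ := PySem.Chars.findFrom_natCast_spec s pvAnchor k hk hr
      set r : Int := PySem.Chars.findFrom s pvAnchor (k : Int) none with hrdef
      have hr0 : 0 ≤ r := le_trans (Int.natCast_nonneg k) hge
      have hrn : r = ((r.toNat : Nat) : Int) := (Int.toNat_of_nonneg hr0).symm
      have hkr : k ≤ r.toNat := by omega
      have hrlen : r.toNat < s.length := by
        rcases hpre with ⟨t, ht⟩
        have : (s.drop r.toNat).length ≠ 0 := by
          rw [← ht]; simp [pvAnchor]
        simp only [List.length_drop] at this
        omega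
      have hslice : PySem.Chars.slice s (some (r + 11)) none = s.drop (r.toNat + 11) := by
        rw [hrn]
        have : ((r.toNat : Int) + 11) = ((r.toNat + 11 : Nat) : Int) := by push_cast; ring
        rw [this, PySem.Chars.slice_eq_listSlice, PySem.List.slice_from_natCast]
        simp
        omega
      have hne : (r == -1) = false := by simp [hr]
      simp only [pvScanLoop, hne, if_false, Bool.false_eq_true, hslice]
      by_cases hc : pvHit s r.toNat = true
      · simp only [pvHit] at hc
        rw [if_pos hc]
        simp only [true_iff]
        exact ⟨r.toNat, hkr, hpre, by simpa [pvHit] using hc⟩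
      · rw [if_neg (by simpa [pvHit] using hc)]
        have hstep : r + 1 = ((r.toNat + 1 : Nat) : Int) := by push_cast; omega
        rw [hstep, ih (r.toNat + 1) (by omega) (by omega)]
        constructor
        · rintro ⟨j, hj, h1, h2⟩
          exact ⟨j, by omega, h1, h2⟩
        · rintro ⟨j, hj, h1, h2⟩
          refine ⟨j, ?_, h1, h2⟩
          by_contra hlt
          push_neg at hlt
          rcases Nat.lt_or_ge j r.toNat with hlt' | hge'
          · exact hmin j hj hlt' h1
          · have : j = r.toNat := by omega
            exact hc (this ▸ h2)

-- characterisation of A: true iff one of the five variable names occurs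
lemma pv_A_iff (s : String) :
    check_webworkflow_config s = true ↔ ∃ v ∈ pvVars, v.toList <:+: s.toList := by
  by_cases hs : s = ""
  · subst hs
    simp only [show check_webworkflow_config "" = false from by decide,
      Bool.false_eq_true, false_iff]
    rintro ⟨v, hv, hinf⟩
    have hn : v.toList = [] := List.infix_nil.mp (by simpa using hinf)
    fin_cases hv <;> simp_all
  · simp only [check_webworkflow_config, beq_iff_eq, hs, if_false, List.cons_append,
      List.nil_append, pv_foldl_or, Bool.false_or, List.any_eq_true,
      PySem.Str.isIn_iff_infix]
    rfl

-- factoring: a variable name occurs at j iff the anchor occurs at j and a tail at j+11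
lemma pv_factor (s : List Char) (j : Nat) :
    (∃ v ∈ pvVars, v.toList <+: s.drop j) ↔
      (pvAnchor <+: s.drop j ∧ ∃ u ∈ pvSuffixes, u.toList <+: s.drop (j + 11)) := by
  have hdrop : (s.drop j).drop 11 = s.drop (j + 11) := by
    rw [List.drop_drop]
  have hlen : pvAnchor.length = 11 := by decide
  have e1 : "CIRCUITPY_WEB_API_PASSWORD".toList = pvAnchor ++ "EB_API_PASSWORD".toList := by decide
  have e2 : "CIRCUITPY_WEB_API_PORT".toList = pvAnchor ++ "EB_API_PORT".toList := by decide
  have e3 : "CIRCUITPY_WEB_API_HOST".toList = pvAnchor ++ "EB_API_HOST".toList := by decide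
  have e4 : "CIRCUITPY_WIFI_SSID".toList = pvAnchor ++ "IFI_SSID".toList := by decide
  have e5 : "CIRCUITPY_WIFI_PASSWORD".toList = pvAnchor ++ "IFI_PASSWORD".toList := by decide
  constructor
  · rintro ⟨v, hv, hp⟩
    fin_cases hv
    · rw [e1, pv_append_prefix, hlen, hdrop] at hp
      exact ⟨hp.1, "EB_API_PASSWORD", by decide, hp.2⟩
    · rw [e2, pv_append_prefix, hlen, hdrop] at hp
      exact ⟨hp.1, "EB_API_PORT", by decide, hp.2⟩
    · rw [e3, pv_append_prefix, hlen, hdrop] at hp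
      exact ⟨hp.1, "EB_API_HOST", by decide, hp.2⟩
    · rw [e4, pv_append_prefix, hlen, hdrop] at hp
      exact ⟨hp.1, "IFI_SSID", by decide, hp.2⟩
    · rw [e5, pv_append_prefix, hlen, hdrop] at hp
      exact ⟨hp.1, "IFI_PASSWORD", by decide, hp.2⟩
  · rintro ⟨ha, u, hu, hp⟩
    fin_cases hu
    · exact ⟨"CIRCUITPY_WEB_API_PASSWORD", by decide, by rw [e1, pv_append_prefix, hlen, hdrop]; exact ⟨ha, hp⟩⟩
    · exact ⟨"CIRCUITPY_WEB_API_PORT", by decide, by rw [e2, pv_append_prefix, hlen, hdrop]; exact ⟨ha, hp⟩⟩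
    · exact ⟨"CIRCUITPY_WEB_API_HOST", by decide, by rw [e3, pv_append_prefix, hlen, hdrop]; exact ⟨ha, hp⟩⟩
    · exact ⟨"CIRCUITPY_WIFI_SSID", by decide, by rw [e4, pv_append_prefix, hlen, hdrop]; exact ⟨ha, hp⟩⟩
    · exact ⟨"CIRCUITPY_WIFI_PASSWORD", by decide, by rw [e5, pv_append_prefix, hlen, hdrop]; exact ⟨ha, hp⟩⟩

theorem pv_main (s : String) :
    check_webworkflow_config s = check_webworkflow_config_alt s := by
  rw [Bool.eq_iff_iff, pv_A_iff]
  have h0 : PySem.Chars.find s.toList pvAnchor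
      = PySem.Chars.findFrom s.toList pvAnchor ((0 : Nat) : Int) none := by
    simp [PySem.Chars.findFrom_zero]
  rw [check_webworkflow_config_alt, h0,
    pv_loop_iff s.toList (s.toList.length + 1) 0 (Nat.zero_le _) (by omega)]
  constructor
  · rintro ⟨v, hv, hinf⟩
    obtain ⟨j, hp⟩ := (PySem.Chars.exists_prefix_drop_iff_isIn v.toList s.toList).mpr
      ((PySem.Chars.isIn_iff_infix v.toList s.toList).mpr hinf)
    have := (pv_factor s.toList j).mp ⟨v, hv, hp⟩
    refine ⟨j, Nat.zero_le _, this.1, ?_⟩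
    simp only [pvHit, List.any_eq_true, PySem.Chars.startswith_iff]
    exact this.2
  · rintro ⟨j, -, ha, hc⟩
    simp only [pvHit, List.any_eq_true, PySem.Chars.startswith_iff] at hc
    obtain ⟨v, hv, hp⟩ := (pv_factor s.toList j).mpr ⟨ha, hc⟩
    exact ⟨v, hv, (PySem.Chars.isIn_iff_infix v.toList s.toList).mp
      ((PySem.Chars.exists_prefix_drop_iff_isIn v.toList s.toList).mp ⟨j, hp⟩)⟩

-- ===== VERDICT (by name: the statement is the Claim_ definition above) =====
theorem check_webworkflow_config_spec : Claim_equal_check_webworkflow_config := by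
  intro s _
  exact pv_main s
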